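-- pv_equiv track=rewrite | github.com/K1DV5/util | etnum.py | etnum
-- ===== SOURCE A (Python) =====
-- nums1  = {1: '\u1369'
--         , 2: '\u136A'
--         , 3: '\u136B'
--         , 4: '\u136C'
--         , 5: '\u136D'
--         , 6: '\u136E'
--         , 7: '\u136F'
--         , 8: '\u1370'
--         , 9: '\u1371'
--         , 0: ""}
--
-- nums10  = {1: '\u1372'
--          , 2: '\u1373'
--          , 3: '\u1374'
--          , 4: '\u1375'
--          , 5: '\u1376'
--          , 6: '\u1377'
--          , 7: '\u1378'
--          , 8: '\u1379'
--          , 9: '\u137A'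
--          , 0: ""}
--
-- num00  =   '\u137B'
--
-- def etnum(n: int):
--     if type(n) != int:
--         raise ValueError(f'{n} is not an integer.')
--     if n < 1:
--         raise ValueError(f'{n} is not a natural number')
--
--     ns = str(n)
--     numlen = len(ns)
--     if numlen % 2 == 1:
--         numlen += 1
--         ns = "0" + ns
--
--     ret = ""
--     for i in range(int(numlen/2)):
--         current2 = ns[i*2:i*2+2]
--         ret = ret + nums10[int(current2[0])] + nums1[int(current2[1])] + num00
--
--     #  clip the 00 at the end and the first if it is 1
--     startPos = 1 if ret[0] == nums1[1] and len(ret) > 2 else 0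
--     return ret[startPos:-1]
-- ===== SOURCE B (Python) =====
-- nums1  = {1: '\u1369', 2: '\u136A', 3: '\u136B', 4: '\u136C', 5: '\u136D',
--           6: '\u136E', 7: '\u136F', 8: '\u1370', 9: '\u1371', 0: ""}
--
-- nums10 = {1: '\u1372', 2: '\u1373', 3: '\u1374', 4: '\u1375', 5: '\u1376',
--           6: '\u1377', 7: '\u1378', 8: '\u1379', 9: '\u137A', 0: ""}
--
-- num00  = '\u137B'
--
-- def etnum(n: int):
--     if type(n) != int:
--         raise ValueError(f'{n} is not an integer.')
--     if n < 1:
--         raise ValueError(f'{n} is not a natural number')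
--
--     # arithmetic base-100 extraction instead of string padding/slicing
--     groups = []
--     while n > 0:
--         n, g = divmod(n, 100)
--         groups.append(g)
--     ret = "".join(nums10[g // 10] + nums1[g % 10] + num00 for g in reversed(groups))
--
--     startPos = 1 if ret[0] == nums1[1] and len(ret) > 2 else 0
--     return ret[startPos:-1]
-- ===== Notes on version B (the rewrite author's own statement) =====
-- stated objective: alternative
-- what changed: Replaces A's str(n) zero-padding and left-to-right two-character slicing with arithmetic base-100 digit extraction via divmod and a join over the reversed group list.
import Mathlib
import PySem

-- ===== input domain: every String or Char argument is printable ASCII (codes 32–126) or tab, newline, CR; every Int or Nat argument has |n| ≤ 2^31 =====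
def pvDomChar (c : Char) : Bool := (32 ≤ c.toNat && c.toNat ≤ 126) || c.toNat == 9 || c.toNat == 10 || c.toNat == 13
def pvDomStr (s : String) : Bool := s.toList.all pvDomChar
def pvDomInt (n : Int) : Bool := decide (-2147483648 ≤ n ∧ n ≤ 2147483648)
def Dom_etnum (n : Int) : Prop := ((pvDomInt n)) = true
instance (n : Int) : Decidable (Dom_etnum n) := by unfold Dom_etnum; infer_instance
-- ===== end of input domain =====

-- B replaces A's str(n) zero-padding and pairwise string slicing by arithmetic base-100
-- extraction with divmod (objective: alternative decomposition, same cost class).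

-- ===== PORT A =====
-- the module constants nums1, nums10, num00 (shared by Source A and Source B)
def etNums1 : PySem.Dict Int (List Char) :=
  PySem.Dict.ofList [(1, ['\u1369']), (2, ['\u136A']), (3, ['\u136B']), (4, ['\u136C']),
    (5, ['\u136D']), (6, ['\u136E']), (7, ['\u136F']), (8, ['\u1370']), (9, ['\u1371']), (0, [])]

def etNums10 : PySem.Dict Int (List Char) :=
  PySem.Dict.ofList [(1, ['\u1372']), (2, ['\u1373']), (3, ['\u1374']), (4, ['\u1375']),
    (5, ['\u1376']), (6, ['\u1377']), (7, ['\u1378']), (8, ['\u1379']), (9, ['\u137A']), (0, [])]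

def etNum00 : Char := '\u137B'

-- 'type(n) != int' is a runtime type guard (moot here: the argument IS an Int);
-- 'n < 1' raises ValueError → excluded by Pre_etnum
def etnum (n : Int) : String :=
  let ns0 := PySem.Int.toChars n
  let numlen0 := ns0.length
  let numlen := if numlen0 % 2 == 1 then numlen0 + 1 else numlen0
  let ns := if numlen0 % 2 == 1 then '0' :: ns0 else ns0
  let ret := (PySem.List.pyRange 0 ((numlen / 2 : Nat) : Int) 1).foldl (fun ret i =>
    let current2 := PySem.List.slice ns (some (i * 2)) (some (i * 2 + 2))
    ret ++ (PySem.Dict.get? etNums10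
              ((PySem.Int.ofChars? [(PySem.List.pyGet? current2 0).getD '0']).getD 0)).getD []
        ++ (PySem.Dict.get? etNums1
              ((PySem.Int.ofChars? [(PySem.List.pyGet? current2 1).getD '0']).getD 0)).getD []
        ++ [etNum00]) []
  let startPos : Int :=
    if (PySem.List.pyGet? ret 0).getD ' ' = '\u1369' ∧ ret.length > 2 then 1 else 0
  String.ofList (PySem.List.slice ret (some startPos) (some (-1)))

-- ===== PORT B =====
-- the 'while n > 0: n, g = divmod(n, 100); groups.append(g)' loop of Source B
def etGroups (n : Int) (groups : List Int) : List Int :=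
  if h : 0 < n then
    etGroups (PySem.Int.floordiv n 100) (groups ++ [PySem.Int.mod n 100])
  else groups
termination_by n.toNat
decreasing_by
  rw [PySem.Int.floordiv_eq_ediv_of_pos (by norm_num : (0:Int) < 100)]
  omega

-- same two guards as A: 'type(n) != int' moot, 'n < 1' raises ValueError → Pre_etnum
def etnum_alt (n : Int) : String :=
  let groups := etGroups n []
  let ret := groups.reverse.foldl (fun r g =>
    r ++ (PySem.Dict.get? etNums10 (PySem.Int.floordiv g 10)).getD []
      ++ (PySem.Dict.get? etNums1 (PySem.Int.mod g 10)).getD []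
      ++ [etNum00]) []
  let startPos : Int :=
    if (PySem.List.pyGet? ret 0).getD ' ' = '\u1369' ∧ ret.length > 2 then 1 else 0
  String.ofList (PySem.List.slice ret (some startPos) (some (-1)))

-- ===== PRECONDITION & SPEC =====
-- A raises ValueError on every n < 1 ('not a natural number'); nothing else raises.
def Pre_etnum (n : Int) : Prop := 1 ≤ n
instance (n : Int) : Decidable (Pre_etnum n) := by unfold Pre_etnum; infer_instance
def pvWitness_etnum : Int := 1

def Spec_etnum (n : Int) (out : String) : Prop := out = etnum_alt n
instance (n : Int) (out : String) : Decidable (Spec_etnum n out) := by unfold Spec_etnum; infer_instance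

-- ===== CLAIM (what is proved, stated in full; the proofs are below) =====
def Claim_equal_etnum : Prop := ∀ (n : Int), Dom_etnum n → Pre_etnum n → Spec_etnum n (etnum n)

-- ===== LEMMAS AND PROOFS =====

-- the three-symbol chunk both programs emit for one base-100 group split into digits d1 d2
def etBody (d1 d2 : Int) : List Char :=
  (PySem.Dict.get? etNums10 d1).getD [] ++ (PySem.Dict.get? etNums1 d2).getD [] ++ [etNum00]

-- the common meaning: the full (unclipped) numeral of m, one chunk per base-100 group
def etS (m : Nat) : List Char :=
  if h : m = 0 then [] else etS (m / 100) ++ etBody ((m % 100 / 10 : Nat) : Int) ((m % 10 : Nat) : Int)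
termination_by m
decreasing_by omega

-- ---- B side ----

-- least-significant-first base-100 groups, as Source B's while-loop collects them
def etG (m : Nat) : List Int :=
  if h : m = 0 then [] else ((m % 100 : Nat) : Int) :: etG (m / 100)
termination_by m
decreasing_by omega

lemma etGroups_eq (m : Nat) (acc : List Int) : etGroups (m : Int) acc = acc ++ etG m := by
  induction m using Nat.strong_induction_on generalizing acc with
  | _ m ih =>
    rw [etGroups, etG]
    by_cases h : m = 0
    · simp [h]
    · have hpos : (0:Int) < (m:Int) := by exact_mod_cast Nat.pos_of_ne_zero h
      rw [dif_pos hpos, dif_neg h]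
      have hf : PySem.Int.floordiv (m:Int) 100 = ((m / 100 : Nat) : Int) := by
        exact_mod_cast PySem.Int.floordiv_natCast m 100
      have hmo : PySem.Int.mod (m:Int) 100 = ((m % 100 : Nat) : Int) := by
        exact_mod_cast PySem.Int.mod_natCast m 100
      rw [hf, hmo]
      rw [ih (m / 100) (by omega)]
      simp

lemma foldB (m : Nat) (r : List Char) :
    (etG m).reverse.foldl (fun r g =>
      r ++ (PySem.Dict.get? etNums10 (PySem.Int.floordiv g 10)).getD []
        ++ (PySem.Dict.get? etNums1 (PySem.Int.mod g 10)).getD []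
        ++ [etNum00]) r = r ++ etS m := by
  induction m using Nat.strong_induction_on generalizing r with
  | _ m ih =>
    rw [etG, etS]
    by_cases h : m = 0
    · simp [h]
    · rw [dif_neg h, dif_neg h]
      simp only [List.reverse_cons, List.foldl_append, List.foldl_cons, List.foldl_nil]
      rw [ih (m / 100) (by omega)]
      have hf : PySem.Int.floordiv ((m % 100 : Nat) : Int) 10 = ((m % 100 / 10 : Nat) : Int) := by
        exact_mod_cast PySem.Int.floordiv_natCast (m % 100) 10
      have hmo : PySem.Int.mod ((m % 100 : Nat) : Int) 10 = ((m % 100 % 10 : Nat) : Int) := by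
        exact_mod_cast PySem.Int.mod_natCast (m % 100) 10
      rw [hf, hmo]
      have : m % 100 % 10 = m % 10 := Nat.mod_mod_of_dvd m (by norm_num)
      rw [this]
      simp [etBody]

-- ---- A side ----

-- the decimal digit characters of m, most significant first
def etDec (m : Nat) : List Char := (Nat.digits 10 m).reverse.map Nat.digitChar

lemma toDigitsCore_eq (f : Nat) : ∀ (n : Nat) (ds : List Char), 1 ≤ n → n < f →
    Nat.toDigitsCore 10 f n ds = (Nat.digits 10 n).reverse.map Nat.digitChar ++ ds := by
  induction f with
  | zero => intro n ds h1 h2; omega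
  | succ f ih =>
    intro n ds h1 h2
    rw [Nat.toDigitsCore]
    by_cases h10 : n / 10 = 0
    · rw [if_pos h10]
      rw [Nat.digits_def' (by norm_num : 1 < 10) (by omega)]
      rw [h10]
      simp
    · rw [if_neg h10]
      rw [ih (n / 10) _ (by omega) (by omega)]
      rw [Nat.digits_def' (by norm_num : 1 < 10) (by omega : 0 < n),
          Nat.digits_def' (by norm_num : 1 < 10) (Nat.pos_of_ne_zero h10)]
      simp

lemma toChars_pos (m : Nat) (h : 1 ≤ m) : PySem.Int.toChars (m : Int) = etDec m := by
  rw [PySem.Int.toChars]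
  rw [if_neg (by omega)]
  simp only [Int.toNat_natCast]
  rw [Nat.toDigits, toDigitsCore_eq (m + 1) m [] h (by omega)]
  simp [etDec]

-- the padded digit list A slices
def etPadded (m : Nat) : List Char :=
  if (etDec m).length % 2 == 1 then '0' :: etDec m else etDec m

lemma etPadded_even (m : Nat) : (etPadded m).length % 2 = 0 := by
  rw [etPadded]
  by_cases h : (etDec m).length % 2 = 1
  · simp [h]; omega
  · simp [h]; omega

lemma etDec_split (m : Nat) (h : 100 ≤ m) :
    etDec m = etDec (m / 100) ++ [Nat.digitChar (m / 10 % 10), Nat.digitChar (m % 10)] := by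
  rw [etDec, Nat.digits_def' (by norm_num : 1 < 10) (by omega : 0 < m),
      Nat.digits_def' (by norm_num : 1 < 10) (by omega : 0 < m / 10)]
  rw [Nat.div_div_eq_div_mul, (by norm_num : 10 * 10 = 100)]
  simp [etDec]

lemma etPadded_split (m : Nat) (h : 100 ≤ m) :
    etPadded m = etPadded (m / 100) ++ [Nat.digitChar (m / 10 % 10), Nat.digitChar (m % 10)] := by
  rw [etPadded, etPadded, etDec_split m h]
  simp only [List.length_append, List.length_cons, List.length_nil]
  by_cases hp : (etDec (m / 100)).length % 2 = 1
  · rw [if_pos (by simp; omega), if_pos (by simp [hp])]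
    simp
  · rw [if_neg (by simp; omega), if_neg (by simp; omega)]

lemma etPadded_small (m : Nat) (h1 : 1 ≤ m) (h2 : m < 100) :
    etPadded m = [Nat.digitChar (m / 10), Nat.digitChar (m % 10)] := by
  by_cases h10 : m < 10
  · have hd : Nat.digits 10 m = [m] := by
      rw [Nat.digits_def' (by norm_num : 1 < 10) (by omega)]
      rw [Nat.div_eq_of_lt h10]
      simp [Nat.mod_eq_of_lt h10]
    rw [etPadded, etDec, hd]
    rw [Nat.div_eq_of_lt h10, Nat.mod_eq_of_lt h10]
    simp [Nat.digitChar]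
  · have hd : Nat.digits 10 m = [m % 10, m / 10] := by
      rw [Nat.digits_def' (by norm_num : 1 < 10) (by omega),
          Nat.digits_def' (by norm_num : 1 < 10) (by omega : 0 < m / 10)]
      rw [Nat.div_div_eq_div_mul, (by norm_num : 10 * 10 = 100), Nat.div_eq_of_lt h2]
      rw [Nat.mod_eq_of_lt (by omega : m / 10 < 10)]
      simp
    rw [etPadded, etDec, hd]
    simp

-- A's loop, as a function of the (already padded) digit-character list
def etLoopA (cs : List Char) : List Char :=
  (PySem.List.pyRange 0 ((cs.length / 2 : Nat) : Int) 1).foldl (fun ret i =>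
    let current2 := PySem.List.slice cs (some (i * 2)) (some (i * 2 + 2))
    ret ++ (PySem.Dict.get? etNums10
              ((PySem.Int.ofChars? [(PySem.List.pyGet? current2 0).getD '0']).getD 0)).getD []
        ++ (PySem.Dict.get? etNums1
              ((PySem.Int.ofChars? [(PySem.List.pyGet? current2 1).getD '0']).getD 0)).getD []
        ++ [etNum00]) []

lemma etLoopA_nil : etLoopA [] = [] := by
  simp [etLoopA, PySem.List.pyRange_one_eq_nil]

lemma ofChars_digitChar (d : Nat) (h : d < 10) :
    (PySem.Int.ofChars? [Nat.digitChar d]).getD 0 = (d : Int) := by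
  interval_cases d <;> decide

lemma etLoopA_append (xs : List Char) (a b : Char) (hev : xs.length % 2 = 0) :
    etLoopA (xs ++ [a, b]) = etLoopA xs
      ++ (PySem.Dict.get? etNums10 ((PySem.Int.ofChars? [a]).getD 0)).getD []
      ++ (PySem.Dict.get? etNums1 ((PySem.Int.ofChars? [b]).getD 0)).getD []
      ++ [etNum00] := by
  have hlen : (xs ++ [a, b]).length = xs.length + 2 := by simp
  have hhalf : ((xs ++ [a, b]).length / 2 : Nat) = xs.length / 2 + 1 := by
    rw [hlen]; omega
  rw [etLoopA, hhalf]
  rw [(by push_cast; ring : ((xs.length / 2 + 1 : Nat) : Int) = ((xs.length / 2 : Nat) : Int) + 1)]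
  rw [PySem.List.pyRange_one_succ_right (Int.natCast_nonneg _)]
  rw [List.foldl_append]
  simp only [List.foldl_cons, List.foldl_nil]
  have hstep : ∀ (i : Int), i ∈ PySem.List.pyRange 0 ((xs.length / 2 : Nat) : Int) 1 →
      PySem.List.slice (xs ++ [a, b]) (some (i * 2)) (some (i * 2 + 2))
        = PySem.List.slice xs (some (i * 2)) (some (i * 2 + 2)) := by
    intro i hi
    rw [PySem.List.mem_pyRange_one] at hi
    have h0 : 0 ≤ i * 2 := by omega
    have h2 : 0 ≤ i * 2 + 2 := by omega
    rw [PySem.List.slice_toNat _ h0 h2, PySem.List.slice_toNat _ h0 h2]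
    have hj : (i * 2).toNat + 2 ≤ xs.length := by
      have : i < ((xs.length / 2 : Nat) : Int) := hi.2
      omega
    rw [List.drop_append_of_le_length (by omega)]
    rw [List.take_append_of_le_length (by simp; omega)]
  have hcongr : (PySem.List.pyRange 0 ((xs.length / 2 : Nat) : Int) 1).foldl (fun ret i =>
      let current2 := PySem.List.slice (xs ++ [a, b]) (some (i * 2)) (some (i * 2 + 2))
      ret ++ (PySem.Dict.get? etNums10
                ((PySem.Int.ofChars? [(PySem.List.pyGet? current2 0).getD '0']).getD 0)).getD []
          ++ (PySem.Dict.get? etNums1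
                ((PySem.Int.ofChars? [(PySem.List.pyGet? current2 1).getD '0']).getD 0)).getD []
          ++ [etNum00]) []
      = etLoopA xs := by
    rw [etLoopA]
    apply PySem.List.foldl_congr_mem
    intro acc i hi
    rw [hstep i hi]
  rw [hcongr]
  -- the last iteration reads exactly [a, b]
  have hlast : PySem.List.slice (xs ++ [a, b])
      (some (((xs.length / 2 : Nat) : Int) * 2)) (some (((xs.length / 2 : Nat) : Int) * 2 + 2))
      = [a, b] := by
    have h0 : (0:Int) ≤ ((xs.length / 2 : Nat) : Int) * 2 := by omega
    rw [PySem.List.slice_toNat _ h0 (by omega)]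
    have hx : (((xs.length / 2 : Nat) : Int) * 2).toNat = xs.length := by omega
    have ht : (((xs.length / 2 : Nat) : Int) * 2 + 2).toNat - (((xs.length / 2 : Nat) : Int) * 2).toNat = 2 := by
      omega
    rw [ht, hx]
    rw [List.drop_append_of_le_length (by omega)]
    simp [List.drop_length]
  simp only [hlast]
  simp [PySem.List.pyGet?, PySem.List.pyIdx?]

-- A's loop on the padded digits of m computes the common meaning etS m
lemma etLoopA_etS (m : Nat) (h : 1 ≤ m) : etLoopA (etPadded m) = etS m := by
  induction m using Nat.strong_induction_on with
  | _ m ih =>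
    have hS : etS m = etS (m / 100) ++ etBody ((m % 100 / 10 : Nat) : Int) ((m % 10 : Nat) : Int) := by
      conv_lhs => rw [etS]
      rw [dif_neg (by omega)]
    by_cases h100 : m < 100
    · rw [etPadded_small m h h100]
      have happ := etLoopA_append [] (Nat.digitChar (m / 10)) (Nat.digitChar (m % 10)) (by simp)
      rw [List.nil_append] at happ
      rw [happ, etLoopA_nil]
      rw [ofChars_digitChar (m / 10) (by omega), ofChars_digitChar (m % 10) (by omega)]
      rw [hS]
      have h0 : m / 100 = 0 := by omega
      have h1 : m % 100 = m := Nat.mod_eq_of_lt h100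
      rw [h0, h1, etS, dif_pos rfl]
      simp [etBody]
    · rw [etPadded_split m (by omega)]
      rw [etLoopA_append _ _ _ (etPadded_even (m / 100))]
      rw [ih (m / 100) (by omega) (by omega)]
      rw [ofChars_digitChar (m / 10 % 10) (by omega), ofChars_digitChar (m % 10) (by omega)]
      rw [hS]
      have h2 : m % 100 / 10 = m / 10 % 10 := by omega
      rw [h2]
      simp [etBody]

-- the two ports' unclipped strings agree
lemma retA_eq (m : Nat) (h : 1 ≤ m) :
    etnum (m : Int) = etnum_alt (m : Int) := by
  rw [etnum, etnum_alt]
  have hns : PySem.Int.toChars (m : Int) = etDec m := toChars_pos m h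
  have hretA :
      (PySem.List.pyRange 0
          (((if (PySem.Int.toChars (m:Int)).length % 2 == 1 then (PySem.Int.toChars (m:Int)).length + 1
             else (PySem.Int.toChars (m:Int)).length) / 2 : Nat) : Int) 1).foldl (fun ret i =>
        let current2 := PySem.List.slice
          (if (PySem.Int.toChars (m:Int)).length % 2 == 1 then '0' :: PySem.Int.toChars (m:Int)
           else PySem.Int.toChars (m:Int)) (some (i * 2)) (some (i * 2 + 2))
        ret ++ (PySem.Dict.get? etNums10
                  ((PySem.Int.ofChars? [(PySem.List.pyGet? current2 0).getD '0']).getD 0)).getD []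
            ++ (PySem.Dict.get? etNums1
                  ((PySem.Int.ofChars? [(PySem.List.pyGet? current2 1).getD '0']).getD 0)).getD []
            ++ [etNum00]) [] = etS m := by
    rw [hns]
    have hpad : (if (etDec m).length % 2 == 1 then '0' :: etDec m else etDec m) = etPadded m := by
      rw [etPadded]
    have hlen : (if (etDec m).length % 2 == 1 then (etDec m).length + 1 else (etDec m).length)
        = (etPadded m).length := by
      rw [etPadded]
      by_cases hp : (etDec m).length % 2 == 1 <;> simp [hp]
    rw [hpad, hlen]
    exact etLoopA_etS m h
  rw [hretA]
  have hretB : (etGroups (m : Int) []).reverse.foldl (fun r g =>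
      r ++ (PySem.Dict.get? etNums10 (PySem.Int.floordiv g 10)).getD []
        ++ (PySem.Dict.get? etNums1 (PySem.Int.mod g 10)).getD []
        ++ [etNum00]) [] = etS m := by
    rw [etGroups_eq m []]
    simpa using foldB m []
  rw [hretB]

-- ===== VERDICT (by name: the statement is the Claim_ definition above) =====
theorem etnum_spec : Claim_equal_etnum := by
  intro n _ hpre
  have hm : n = ((n.toNat : Nat) : Int) := by
    have : 0 ≤ n := by exact le_trans (by norm_num) hpre
    omega
  rw [Spec_etnum, hm]
  exact retA_eq n.toNat (by unfold Pre_etnum at hpre; omega)
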